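-- pv_equiv track=rewrite | github.com/SirOcelot/dim-intelligence-engine | src/dim_enrichment_engine/phase40_reasoning.py | decision_reason
-- ===== SOURCE A (Python) =====
-- def decision_reason(slot: str, selected: str, owned: set[str]) -> tuple[str, list[str]]:
--     if slot == "kinetic" and selected == "Buried Bloodline":
--         rejected = [x for x in ["Witherhoard", "Arbalest"] if x in owned]
--         return "it gives the safest sustain and utility shell for hard endgame", rejected
--     if slot == "kinetic" and selected == "Witherhoard":
--         rejected = [x for x in ["Buried Bloodline", "Arbalest"] if x in owned]
--         return "it gives passive damage and area denial when sustain is less critical", rejected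
--     if slot == "energy" and selected == "Le Monarque":
--         rejected = [x for x in ["Outbreak Perfected", "Graviton Lance", "Choir of One", "Trinity Ghoul"] if x in owned]
--         return "it gives safer long-range pressure and overload utility than your other energy choices", rejected
--     if slot == "energy" and selected == "Outbreak Perfected":
--         rejected = [x for x in ["Le Monarque", "Graviton Lance", "Choir of One"] if x in owned]
--         return "it gives better ammo-efficient primary damage when direct champion utility matters less", rejected
--     if slot == "power" and selected == "Leviathan's Breath":
--         rejected = [x for x in ["Thunderlord", "Dragon's Breath", "Gjallarhorn", "Microcosm"] if x in owned]
--         return "it combines safer heavy damage with champion utility", rejected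
--     if slot == "power" and selected == "Thunderlord":
--         rejected = [x for x in ["Leviathan's Breath", "Dragon's Breath", "Gjallarhorn"] if x in owned]
--         return "it gives lower-friction sustained damage and easier handling", rejected
--     if slot == "armor_exotic" and selected == "Gyrfalcon's Hauberk":
--         rejected = [x for x in ["Cyrtarachne's Facade", "Orpheus Rig", "Assassin's Cowl", "Lucky Pants"] if x in owned]
--         return "it provides the strongest practical invis and volatile loop from your Hunter options", rejected
--     if slot == "armor_exotic" and selected == "Cyrtarachne's Facade":
--         rejected = [x for x in ["Gyrfalcon's Hauberk", "Orpheus Rig", "Assassin's Cowl", "Lucky Pants"] if x in owned]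
--         return "it stabilizes survivability through damage resistance instead of greedier burst options", rejected
--     return "it best fits the current activity profile from your owned options", []
-- ===== SOURCE B (Python) =====
-- _DEFAULT = "it best fits the current activity profile from your owned options"
--
-- _CASES = {
--     ("kinetic", "Buried Bloodline"):
--         ("it gives the safest sustain and utility shell for hard endgame",
--          ["Witherhoard", "Arbalest"]),
--     ("kinetic", "Witherhoard"):
--         ("it gives passive damage and area denial when sustain is less critical",
--          ["Buried Bloodline", "Arbalest"]),
--     ("energy", "Le Monarque"):
--         ("it gives safer long-range pressure and overload utility than your other energy choices",
--          ["Outbreak Perfected", "Graviton Lance", "Choir of One", "Trinity Ghoul"]),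
--     ("energy", "Outbreak Perfected"):
--         ("it gives better ammo-efficient primary damage when direct champion utility matters less",
--          ["Le Monarque", "Graviton Lance", "Choir of One"]),
--     ("power", "Leviathan's Breath"):
--         ("it combines safer heavy damage with champion utility",
--          ["Thunderlord", "Dragon's Breath", "Gjallarhorn", "Microcosm"]),
--     ("power", "Thunderlord"):
--         ("it gives lower-friction sustained damage and easier handling",
--          ["Leviathan's Breath", "Dragon's Breath", "Gjallarhorn"]),
--     ("armor_exotic", "Gyrfalcon's Hauberk"):
--         ("it provides the strongest practical invis and volatile loop from your Hunter options",
--          ["Cyrtarachne's Facade", "Orpheus Rig", "Assassin's Cowl", "Lucky Pants"]),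
--     ("armor_exotic", "Cyrtarachne's Facade"):
--         ("it stabilizes survivability through damage resistance instead of greedier burst options",
--          ["Gyrfalcon's Hauberk", "Orpheus Rig", "Assassin's Cowl", "Lucky Pants"]),
-- }
--
--
-- def decision_reason(slot: str, selected: str, owned: set[str]) -> tuple[str, list[str]]:
--     # Traverse the OWNED set (not the candidate list): collect the owned items
--     # that are rejected alternatives for this decision, then put them in
--     # canonical order by sorting on their index in the candidate list.
--     reason, cands = _CASES.get((slot, selected), (_DEFAULT, []))
--     return reason, sorted((x for x in owned if x in cands), key=cands.index)
-- ===== Notes on version B (the rewrite author's own statement) =====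
-- stated objective: alternative
-- what changed: B inverts the traversal: instead of scanning each branch's candidate list and testing membership in owned, it scans the owned set collecting rejected alternatives and restores canonical order with a key-sort on the candidate index; dispatch is one table lookup instead of the eight-branch if-chain.
import Mathlib
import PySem

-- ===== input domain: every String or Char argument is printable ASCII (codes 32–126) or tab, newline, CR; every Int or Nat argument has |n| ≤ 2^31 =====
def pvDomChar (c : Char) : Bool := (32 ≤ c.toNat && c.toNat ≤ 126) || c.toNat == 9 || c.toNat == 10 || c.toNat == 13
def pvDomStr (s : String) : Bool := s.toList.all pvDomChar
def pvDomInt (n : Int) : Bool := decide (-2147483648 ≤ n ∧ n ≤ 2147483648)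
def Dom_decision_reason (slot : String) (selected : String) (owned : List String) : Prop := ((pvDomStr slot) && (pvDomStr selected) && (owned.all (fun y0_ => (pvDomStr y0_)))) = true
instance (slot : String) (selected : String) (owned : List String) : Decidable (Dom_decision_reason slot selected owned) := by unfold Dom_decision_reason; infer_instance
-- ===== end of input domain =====

-- B inverts the traversal (scans the owned set and key-sorts the hits by candidate
-- index, with a single table lookup for dispatch) instead of A's eight-branch
-- if-chain that scans each candidate list; same return value (alternative).

-- ===== PORT A =====
-- literal transliteration of A's if-chain: each branch filters its own candidate
-- list by membership in owned and returns its own reason string.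
def decision_reason (slot : String) (selected : String) (owned : List String) : String × List String :=
  if slot = "kinetic" ∧ selected = "Buried Bloodline" then
    ("it gives the safest sustain and utility shell for hard endgame",
     (["Witherhoard", "Arbalest"]).filter (fun x => owned.contains x))
  else if slot = "kinetic" ∧ selected = "Witherhoard" then
    ("it gives passive damage and area denial when sustain is less critical",
     (["Buried Bloodline", "Arbalest"]).filter (fun x => owned.contains x))
  else if slot = "energy" ∧ selected = "Le Monarque" then
    ("it gives safer long-range pressure and overload utility than your other energy choices",
     (["Outbreak Perfected", "Graviton Lance", "Choir of One", "Trinity Ghoul"]).filter (fun x => owned.contains x))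
  else if slot = "energy" ∧ selected = "Outbreak Perfected" then
    ("it gives better ammo-efficient primary damage when direct champion utility matters less",
     (["Le Monarque", "Graviton Lance", "Choir of One"]).filter (fun x => owned.contains x))
  else if slot = "power" ∧ selected = "Leviathan's Breath" then
    ("it combines safer heavy damage with champion utility",
     (["Thunderlord", "Dragon's Breath", "Gjallarhorn", "Microcosm"]).filter (fun x => owned.contains x))
  else if slot = "power" ∧ selected = "Thunderlord" then
    ("it gives lower-friction sustained damage and easier handling",
     (["Leviathan's Breath", "Dragon's Breath", "Gjallarhorn"]).filter (fun x => owned.contains x))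
  else if slot = "armor_exotic" ∧ selected = "Gyrfalcon's Hauberk" then
    ("it provides the strongest practical invis and volatile loop from your Hunter options",
     (["Cyrtarachne's Facade", "Orpheus Rig", "Assassin's Cowl", "Lucky Pants"]).filter (fun x => owned.contains x))
  else if slot = "armor_exotic" ∧ selected = "Cyrtarachne's Facade" then
    ("it stabilizes survivability through damage resistance instead of greedier burst options",
     (["Gyrfalcon's Hauberk", "Orpheus Rig", "Assassin's Cowl", "Lucky Pants"]).filter (fun x => owned.contains x))
  else
    ("it best fits the current activity profile from your owned options", [])

-- ===== PORT B =====
-- _DEFAULT of Source B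
def dr_default : String := "it best fits the current activity profile from your owned options"

-- the module-level dispatch table _CASES of Source B
def dr_table : List ((String × String) × (String × List String)) :=
  [ (("kinetic", "Buried Bloodline"),
     ("it gives the safest sustain and utility shell for hard endgame",
      ["Witherhoard", "Arbalest"])),
    (("kinetic", "Witherhoard"),
     ("it gives passive damage and area denial when sustain is less critical",
      ["Buried Bloodline", "Arbalest"])),
    (("energy", "Le Monarque"),
     ("it gives safer long-range pressure and overload utility than your other energy choices",
      ["Outbreak Perfected", "Graviton Lance", "Choir of One", "Trinity Ghoul"])),
    (("energy", "Outbreak Perfected"),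
     ("it gives better ammo-efficient primary damage when direct champion utility matters less",
      ["Le Monarque", "Graviton Lance", "Choir of One"])),
    (("power", "Leviathan's Breath"),
     ("it combines safer heavy damage with champion utility",
      ["Thunderlord", "Dragon's Breath", "Gjallarhorn", "Microcosm"])),
    (("power", "Thunderlord"),
     ("it gives lower-friction sustained damage and easier handling",
      ["Leviathan's Breath", "Dragon's Breath", "Gjallarhorn"])),
    (("armor_exotic", "Gyrfalcon's Hauberk"),
     ("it provides the strongest practical invis and volatile loop from your Hunter options",
      ["Cyrtarachne's Facade", "Orpheus Rig", "Assassin's Cowl", "Lucky Pants"])),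
    (("armor_exotic", "Cyrtarachne's Facade"),
     ("it stabilizes survivability through damage resistance instead of greedier burst options",
      ["Gyrfalcon's Hauberk", "Orpheus Rig", "Assassin's Cowl", "Lucky Pants"])) ]

-- Source B: one table lookup, then a pass over OWNED collecting items that are in the
-- candidate list, key-sorted by cands.index.  cands.index(x) is only ever applied
-- to x ∈ cands (the generator filtered on it), so the total key
-- (index? cands x).getD 0 is exact where it is evaluated.
def decision_reason_alt (slot : String) (selected : String) (owned : List String) : String × List String :=
  let rc := (dr_table.lookup (slot, selected)).getD (dr_default, [])
  (rc.1, PySem.List.sorted (owned.filter (fun x => rc.2.contains x))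
           (fun x => (PySem.List.index? rc.2 x).getD 0) false)

-- ===== PRECONDITION & SPEC =====
-- Pre_ only states the type convention: `owned` models a Python set[str], so its
-- list model holds distinct elements (no input A accepts is excluded).
def Pre_decision_reason (slot : String) (selected : String) (owned : List String) : Prop := owned.Nodup
instance (slot : String) (selected : String) (owned : List String) : Decidable (Pre_decision_reason slot selected owned) := by unfold Pre_decision_reason; infer_instance
def pvWitness_decision_reason : String × String × List String :=
  ("kinetic", "Buried Bloodline", ["Arbalest", "Witherhoard", "Sunshot"])
def Spec_decision_reason (slot : String) (selected : String) (owned : List String) (out : String × List String) : Prop := out = decision_reason_alt slot selected owned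
instance (slot : String) (selected : String) (owned : List String) (out : String × List String) : Decidable (Spec_decision_reason slot selected owned out) := by unfold Spec_decision_reason; infer_instance

-- ===== CLAIM (what is proved, stated in full; the proofs are below) =====
def Claim_equal_decision_reason : Prop := ∀ (slot : String) (selected : String) (owned : List String), Dom_decision_reason slot selected owned → Pre_decision_reason slot selected owned → Spec_decision_reason slot selected owned (decision_reason slot selected owned)

-- ===== LEMMAS AND PROOFS =====

-- For a member of cands, the total sort key is its Python list.index value.
theorem pv_key_eq (cands : List String) (x : String) (hx : x ∈ cands) :
    ((PySem.List.index? cands x).getD 0) = cands.idxOf x := by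
  rw [PySem.List.index?_eq_idxOf?]
  rcases h : cands.idxOf? x with _ | k
  · rw [List.idxOf?_eq_none_iff] at h; exact absurd hx h
  · have h2 := List.idxOf_eq_getD_idxOf? x cands
    rw [h] at h2; simp [h2]

-- The shared fact behind all eight branches: key-sorting the owned items that lie
-- in a duplicate-free candidate list restores candidate order.
theorem pv_sort_filter (cands owned : List String) (hc : cands.Nodup) (ho : owned.Nodup) :
    PySem.List.sorted (owned.filter (fun x => cands.contains x))
      (fun x => (PySem.List.index? cands x).getD 0) false
      = cands.filter (fun x => owned.contains x) := by
  apply PySem.List.sorted_eq_of_perm_of_pairwise_lt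
  · apply (List.perm_ext_iff_of_nodup (hc.filter _) (ho.filter _)).mpr
    intro a
    simp [List.mem_filter]
    tauto
  · have hp : cands.Pairwise
        (fun a b => ((PySem.List.index? cands a).getD 0) < ((PySem.List.index? cands b).getD 0)) := by
      rw [List.pairwise_iff_getElem]
      intro i j hi hj hij
      rw [pv_key_eq cands _ (cands.getElem_mem hi), pv_key_eq cands _ (cands.getElem_mem hj),
          hc.idxOf_getElem i hi, hc.idxOf_getElem j hj]
      exact hij
    exact List.Pairwise.sublist List.filter_sublist hp

-- ===== VERDICT (by name: the statement is the Claim_ definition above) =====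
set_option maxHeartbeats 1600000 in
theorem decision_reason_spec : Claim_equal_decision_reason := by
  intro slot selected owned _ ho
  unfold Spec_decision_reason decision_reason
  split_ifs with h1 h2 h3 h4 h5 h6 h7 h8
  · obtain ⟨hs, ht⟩ := h1; subst hs; subst ht
    have halt : decision_reason_alt "kinetic" "Buried Bloodline" owned
        = ("it gives the safest sustain and utility shell for hard endgame",
           PySem.List.sorted (owned.filter (fun x => (["Witherhoard", "Arbalest"] : List String).contains x))
             (fun x => (PySem.List.index? ["Witherhoard", "Arbalest"] x).getD 0) false) := rfl
    rw [halt, pv_sort_filter _ owned (by decide) ho]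
  · obtain ⟨hs, ht⟩ := h2; subst hs; subst ht
    have halt : decision_reason_alt "kinetic" "Witherhoard" owned
        = ("it gives passive damage and area denial when sustain is less critical",
           PySem.List.sorted (owned.filter (fun x => (["Buried Bloodline", "Arbalest"] : List String).contains x))
             (fun x => (PySem.List.index? ["Buried Bloodline", "Arbalest"] x).getD 0) false) := rfl
    rw [halt, pv_sort_filter _ owned (by decide) ho]
  · obtain ⟨hs, ht⟩ := h3; subst hs; subst ht
    have halt : decision_reason_alt "energy" "Le Monarque" owned
        = ("it gives safer long-range pressure and overload utility than your other energy choices",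
           PySem.List.sorted (owned.filter (fun x => (["Outbreak Perfected", "Graviton Lance", "Choir of One", "Trinity Ghoul"] : List String).contains x))
             (fun x => (PySem.List.index? ["Outbreak Perfected", "Graviton Lance", "Choir of One", "Trinity Ghoul"] x).getD 0) false) := rfl
    rw [halt, pv_sort_filter _ owned (by decide) ho]
  · obtain ⟨hs, ht⟩ := h4; subst hs; subst ht
    have halt : decision_reason_alt "energy" "Outbreak Perfected" owned
        = ("it gives better ammo-efficient primary damage when direct champion utility matters less",
           PySem.List.sorted (owned.filter (fun x => (["Le Monarque", "Graviton Lance", "Choir of One"] : List String).contains x))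
             (fun x => (PySem.List.index? ["Le Monarque", "Graviton Lance", "Choir of One"] x).getD 0) false) := rfl
    rw [halt, pv_sort_filter _ owned (by decide) ho]
  · obtain ⟨hs, ht⟩ := h5; subst hs; subst ht
    have halt : decision_reason_alt "power" "Leviathan's Breath" owned
        = ("it combines safer heavy damage with champion utility",
           PySem.List.sorted (owned.filter (fun x => (["Thunderlord", "Dragon's Breath", "Gjallarhorn", "Microcosm"] : List String).contains x))
             (fun x => (PySem.List.index? ["Thunderlord", "Dragon's Breath", "Gjallarhorn", "Microcosm"] x).getD 0) false) := rfl
    rw [halt, pv_sort_filter _ owned (by decide) ho]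
  · obtain ⟨hs, ht⟩ := h6; subst hs; subst ht
    have halt : decision_reason_alt "power" "Thunderlord" owned
        = ("it gives lower-friction sustained damage and easier handling",
           PySem.List.sorted (owned.filter (fun x => (["Leviathan's Breath", "Dragon's Breath", "Gjallarhorn"] : List String).contains x))
             (fun x => (PySem.List.index? ["Leviathan's Breath", "Dragon's Breath", "Gjallarhorn"] x).getD 0) false) := rfl
    rw [halt, pv_sort_filter _ owned (by decide) ho]
  · obtain ⟨hs, ht⟩ := h7; subst hs; subst ht
    have halt : decision_reason_alt "armor_exotic" "Gyrfalcon's Hauberk" owned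
        = ("it provides the strongest practical invis and volatile loop from your Hunter options",
           PySem.List.sorted (owned.filter (fun x => (["Cyrtarachne's Facade", "Orpheus Rig", "Assassin's Cowl", "Lucky Pants"] : List String).contains x))
             (fun x => (PySem.List.index? ["Cyrtarachne's Facade", "Orpheus Rig", "Assassin's Cowl", "Lucky Pants"] x).getD 0) false) := rfl
    rw [halt, pv_sort_filter _ owned (by decide) ho]
  · obtain ⟨hs, ht⟩ := h8; subst hs; subst ht
    have halt : decision_reason_alt "armor_exotic" "Cyrtarachne's Facade" owned
        = ("it stabilizes survivability through damage resistance instead of greedier burst options",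
           PySem.List.sorted (owned.filter (fun x => (["Gyrfalcon's Hauberk", "Orpheus Rig", "Assassin's Cowl", "Lucky Pants"] : List String).contains x))
             (fun x => (PySem.List.index? ["Gyrfalcon's Hauberk", "Orpheus Rig", "Assassin's Cowl", "Lucky Pants"] x).getD 0) false) := rfl
    rw [halt, pv_sort_filter _ owned (by decide) ho]
  · -- default branch: (slot, selected) matches no table key, so the lookup misses
    have b1 : ((slot, selected) == ("kinetic", "Buried Bloodline")) = false := by
      simp [Prod.ext_iff]; tauto
    have b2 : ((slot, selected) == ("kinetic", "Witherhoard")) = false := by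
      simp [Prod.ext_iff]; tauto
    have b3 : ((slot, selected) == ("energy", "Le Monarque")) = false := by
      simp [Prod.ext_iff]; tauto
    have b4 : ((slot, selected) == ("energy", "Outbreak Perfected")) = false := by
      simp [Prod.ext_iff]; tauto
    have b5 : ((slot, selected) == ("power", "Leviathan's Breath")) = false := by
      simp [Prod.ext_iff]; tauto
    have b6 : ((slot, selected) == ("power", "Thunderlord")) = false := by
      simp [Prod.ext_iff]; tauto
    have b7 : ((slot, selected) == ("armor_exotic", "Gyrfalcon's Hauberk")) = false := by
      simp [Prod.ext_iff]; tauto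
    have b8 : ((slot, selected) == ("armor_exotic", "Cyrtarachne's Facade")) = false := by
      simp [Prod.ext_iff]; tauto
    simp [decision_reason_alt, dr_table, dr_default, List.lookup,
      b1, b2, b3, b4, b5, b6, b7, b8, PySem.List.sorted]
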